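-- pv_equiv track=rewrite | github.com/zacheen/python | python_learn/Algorithm_template/match_sequence/Z-algorithm.py | LCP_all
-- ===== SOURCE A (Python) =====
-- def LCP_all(arr) :
--     len_n = len(arr)
--     lcp = [[0]*(len_n+1) for _ in range(len_n+1)]
--     for i in range(len_n-1,-1,-1):
--         for j in range(i + 1, len_n):
--             if arr[i] == arr[j]:
--                 lcp[i][j] = lcp[i + 1][j + 1] + 1
--     return lcp
-- ===== SOURCE B (Python) =====
-- def LCP_all(arr):
--     # Diagonal sweep: thread a scalar run-length counter along each offset d
--     # instead of reading lcp[i+1][j+1] back out of the 2D table.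
--     n = len(arr)
--     lcp = [[0] * (n + 1) for _ in range(n + 1)]
--     for d in range(1, n):
--         c = 0
--         for i in range(n - 1 - d, -1, -1):
--             c = c + 1 if arr[i] == arr[i + d] else 0
--             lcp[i][i + d] = c
--     return lcp
-- ===== Notes on version B (the rewrite author's own statement) =====
-- stated objective: alternative
-- what changed: B fills the table diagonal by diagonal with a scalar run-length accumulator per offset d, instead of A's row-by-row nested loops that read lcp[i+1][j+1] back out of the 2D table.
import Mathlib
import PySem

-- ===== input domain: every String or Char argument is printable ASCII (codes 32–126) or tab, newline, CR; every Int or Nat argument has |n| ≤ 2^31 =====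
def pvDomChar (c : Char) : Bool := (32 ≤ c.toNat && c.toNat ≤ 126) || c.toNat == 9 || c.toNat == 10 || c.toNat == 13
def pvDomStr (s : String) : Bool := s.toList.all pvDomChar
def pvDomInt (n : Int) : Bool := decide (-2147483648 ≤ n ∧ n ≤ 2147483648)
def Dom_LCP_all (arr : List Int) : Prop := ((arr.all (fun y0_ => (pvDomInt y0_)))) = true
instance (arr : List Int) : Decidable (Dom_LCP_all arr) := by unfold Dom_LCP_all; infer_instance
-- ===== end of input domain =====

-- B fills the LCP table diagonal by diagonal with a scalar run-length accumulator,
-- instead of A's row-by-row nested loops that read lcp[i+1][j+1] back from the 2D table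
-- (objective: alternative decomposition, same O(n^2) cost).

-- shared table-write helper: lcp[i][j] = v  (indices produced by the loops are in range)
def pvSetMat (m : List (List Int)) (i j : Nat) (v : Int) : List (List Int) :=
  m.set i ((m.getD i []).set j v)

-- ===== PORT A =====
def LCP_all (arr : List Int) : List (List Int) :=
  let n := arr.length
  let lcp0 := List.replicate (n+1) (List.replicate (n+1) (0:Int))
  (List.range n).reverse.foldl
    (fun lcp i =>
      (List.range' (i+1) (n - (i+1))).foldl
        (fun lcp j =>
          if arr.getD i 0 = arr.getD j 0 then
            pvSetMat lcp i j (((lcp.getD (i+1) []).getD (j+1) 0) + 1)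
          else lcp)
        lcp)
    lcp0

-- ===== PORT B =====
def LCP_all_alt (arr : List Int) : List (List Int) :=
  let n := arr.length
  let lcp0 := List.replicate (n+1) (List.replicate (n+1) (0:Int))
  (List.range' 1 (n-1)).foldl
    (fun lcp d =>
      ((List.range (n-d)).reverse.foldl
        (fun (st : List (List Int) × Int) i =>
          let c := if arr.getD i 0 = arr.getD (i+d) 0 then st.2 + 1 else 0
          (pvSetMat st.1 i (i+d) c, c))
        (lcp, 0)).1)
    lcp0

-- ===== PRECONDITION & SPEC =====
def Spec_LCP_all (arr : List Int) (out : List (List Int)) : Prop := out = LCP_all_alt arr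
instance (arr : List Int) (out : List (List Int)) : Decidable (Spec_LCP_all arr out) := by unfold Spec_LCP_all; infer_instance

-- ===== CLAIM (what is proved, stated in full; the proofs are below) =====
def Claim_equal_LCP_all : Prop := ∀ (arr : List Int), Dom_LCP_all arr → Spec_LCP_all arr (LCP_all arr)

-- ===== LEMMAS AND PROOFS =====

-- the common specification value: length of the matching run starting at (i, j)
def runLen (arr : List Int) (i j : Nat) : Int :=
  if h : i < j ∧ j < arr.length ∧ arr.getD i 0 = arr.getD j 0 then
    runLen arr (i+1) (j+1) + 1
  else 0
termination_by arr.length - j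
decreasing_by omega

lemma runLen_zero {arr : List Int} {i j : Nat}
    (h : ¬ (i < j ∧ j < arr.length ∧ arr.getD i 0 = arr.getD j 0)) :
    runLen arr i j = 0 := by
  rw [runLen, dif_neg h]

-- functional matrices
def mkMat (n : Nat) (f : Nat → Nat → Int) : List (List Int) :=
  (List.range (n+1)).map (fun i => (List.range (n+1)).map (f i))

lemma mkMat_congr {n : Nat} {f g : Nat → Nat → Int}
    (h : ∀ i j, i ≤ n → j ≤ n → f i j = g i j) : mkMat n f = mkMat n g := by
  unfold mkMat
  refine List.map_congr_left (fun i hi => ?_)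
  refine List.map_congr_left (fun j hj => ?_)
  exact h i j (by simpa using Nat.lt_succ_iff.mp (List.mem_range.mp hi))
    (by simpa using Nat.lt_succ_iff.mp (List.mem_range.mp hj))

lemma replicate_eq_mkMat (n : Nat) :
    List.replicate (n+1) (List.replicate (n+1) (0:Int)) = mkMat n (fun _ _ => 0) := by
  unfold mkMat
  simp [List.map_const']

lemma set_map_range {α : Type} (m i : Nat) (f : Nat → α) (v : α) (_hi : i < m) :
    ((List.range m).map f).set i v = (List.range m).map (fun k => if k = i then v else f k) := by
  apply List.ext_getElem
  · simp
  · intro k h1 h2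
    simp only [List.getElem_set, List.getElem_map, List.getElem_range]
    by_cases hk : k = i
    · simp [hk]
    · simp [hk, Ne.symm hk]

lemma getD_mkMat_row {n : Nat} (f : Nat → Nat → Int) {i : Nat} (hi : i ≤ n) :
    (mkMat n f).getD i [] = (List.range (n+1)).map (f i) := by
  unfold mkMat
  rw [List.getD_eq_getElem?_getD]
  simp [Nat.lt_succ_iff.mpr hi]

lemma getD_mkMat {n : Nat} (f : Nat → Nat → Int) {i j : Nat} (hi : i ≤ n) (hj : j ≤ n) :
    ((mkMat n f).getD i []).getD j 0 = f i j := by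
  rw [getD_mkMat_row f hi, List.getD_eq_getElem?_getD]
  simp [Nat.lt_succ_iff.mpr hj]

lemma pvSetMat_mkMat {n : Nat} (f : Nat → Nat → Int) {i j : Nat} (v : Int)
    (hi : i ≤ n) (hj : j ≤ n) :
    pvSetMat (mkMat n f) i j v
      = mkMat n (fun i' j' => if i' = i ∧ j' = j then v else f i' j') := by
  unfold pvSetMat
  rw [getD_mkMat_row f hi,
    set_map_range _ _ _ _ (Nat.lt_succ_iff.mpr hj)]
  unfold mkMat
  rw [set_map_range _ _ _ _ (Nat.lt_succ_iff.mpr hi)]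
  refine List.map_congr_left (fun i' _ => ?_)
  by_cases h1 : i' = i
  · subst h1
    simp only [if_true]
    refine List.map_congr_left (fun j' _ => ?_)
    by_cases h2 : j' = j <;> simp [h2]
  · simp only [if_neg h1]
    refine List.map_congr_left (fun j' _ => ?_)
    simp [h1]

-- ---------- port A equals mkMat runLen ----------

-- rows ≥ k already filled with runLen, rows < k still zero
def aPart (arr : List Int) (k : Nat) : Nat → Nat → Int :=
  fun i j => if k ≤ i then runLen arr i j else 0

-- row k partially filled: cells j < k+1+m done
def aRow (arr : List Int) (k m : Nat) : Nat → Nat → Int :=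
  fun i j => if i = k then (if j < k+1+m then runLen arr i j else 0) else aPart arr (k+1) i j

lemma aInner (arr : List Int) (k : Nat) (hk : k < arr.length) :
    ∀ m, k+1+m ≤ arr.length →
    (List.range' (k+1) m).foldl
      (fun lcp j =>
        if arr.getD k 0 = arr.getD j 0 then
          pvSetMat lcp k j (((lcp.getD (k+1) []).getD (j+1) 0) + 1)
        else lcp)
      (mkMat arr.length (aRow arr k 0))
      = mkMat arr.length (aRow arr k m) := by
  intro m
  induction m with
  | zero => intro _; simp
  | succ m ih =>
    intro hm
    rw [List.range'_concat, List.foldl_append, ih (by omega)]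
    simp only [List.foldl_cons, List.foldl_nil, one_mul]
    set j := k + 1 + m with hj
    have hjn : j < arr.length := by omega
    have hrd : ((mkMat arr.length (aRow arr k m)).getD (k+1) []).getD (j+1) 0
        = runLen arr (k+1) (j+1) := by
      rw [getD_mkMat _ (by omega) (by omega)]
      unfold aRow aPart
      rw [if_neg (show ¬ (k+1 = k) by omega), if_pos (le_refl (k+1))]
    by_cases he : arr.getD k 0 = arr.getD j 0
    · rw [if_pos he, hrd, pvSetMat_mkMat _ _ (by omega) (by omega)]
      refine mkMat_congr (fun p q hp hq => ?_)
      unfold aRow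
      by_cases h1 : p = k
      · by_cases h2 : q = j
        · rw [if_pos ⟨h1, h2⟩, if_pos h1, if_pos (show q < k+1+(m+1) by omega)]
          rw [h1, h2]
          have hstep : runLen arr k j = runLen arr (k+1) (j+1) + 1 := by
            rw [runLen, dif_pos ⟨by omega, hjn, he⟩]
          rw [hstep]
        · rw [if_neg (show ¬ (p = k ∧ q = j) by simp [h2]), if_pos h1, if_pos h1]
          by_cases h3 : q < k+1+m
          · rw [if_pos h3, if_pos (by omega)]
          · rw [if_neg h3, if_neg (by omega)]
      · rw [if_neg (show ¬ (p = k ∧ q = j) by simp [h1]), if_neg h1, if_neg h1]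
    · rw [if_neg he]
      refine mkMat_congr (fun p q hp hq => ?_)
      unfold aRow
      by_cases h1 : p = k
      · rw [if_pos h1, if_pos h1]
        by_cases h2 : q = j
        · rw [if_neg (show ¬ (q < k+1+m) by omega), if_pos (show q < k+1+(m+1) by omega)]
          rw [h1, h2, runLen_zero (by rintro ⟨-, -, h⟩; exact he h)]
        · by_cases h3 : q < k+1+m
          · rw [if_pos h3, if_pos (by omega)]
          · rw [if_neg h3, if_neg (by omega)]
      · rw [if_neg h1, if_neg h1]

lemma aRow_zero (arr : List Int) (k : Nat) :
    mkMat arr.length (aPart arr (k+1)) = mkMat arr.length (aRow arr k 0) := by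
  refine mkMat_congr (fun i j _ _ => ?_)
  unfold aRow aPart
  by_cases h1 : i = k
  · rw [if_neg (show ¬ (k+1 ≤ i) by omega), if_pos h1]
    by_cases h2 : j < k+1+0
    · rw [if_pos h2, runLen_zero (by rintro ⟨h', -, -⟩; omega)]
    · rw [if_neg h2]
  · rw [if_neg h1]

lemma aRow_full (arr : List Int) (k : Nat) (hk : k < arr.length) :
    mkMat arr.length (aRow arr k (arr.length - (k+1))) = mkMat arr.length (aPart arr k) := by
  refine mkMat_congr (fun i j _ hj => ?_)
  unfold aRow aPart
  by_cases h1 : i = k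
  · rw [if_pos h1, if_pos (show k ≤ i by omega)]
    by_cases h2 : j < k+1+(arr.length - (k+1))
    · rw [if_pos h2]
    · rw [if_neg h2, runLen_zero (by rintro ⟨h1', h2', -⟩; omega)]
  · rw [if_neg h1]
    by_cases h2 : k+1 ≤ i
    · rw [if_pos h2, if_pos (by omega)]
    · rw [if_neg h2, if_neg (show ¬ (k ≤ i) by omega)]

lemma aOuter (arr : List Int) :
    ∀ k, k ≤ arr.length →
    (List.range k).reverse.foldl
      (fun lcp i =>
        (List.range' (i+1) (arr.length - (i+1))).foldl
          (fun lcp j =>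
            if arr.getD i 0 = arr.getD j 0 then
              pvSetMat lcp i j (((lcp.getD (i+1) []).getD (j+1) 0) + 1)
            else lcp)
          lcp)
      (mkMat arr.length (aPart arr k))
      = mkMat arr.length (aPart arr 0) := by
  intro k
  induction k with
  | zero => intro _; simp
  | succ k ih =>
    intro hk
    rw [List.range_succ, List.reverse_append]
    simp only [List.reverse_cons, List.reverse_nil, List.nil_append, List.singleton_append,
      List.foldl_cons]
    rw [aRow_zero, aInner arr k (by omega) (arr.length - (k+1)) (by omega),
      aRow_full arr k (by omega)]
    exact ih (by omega)

lemma LCP_all_eq (arr : List Int) :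
    LCP_all arr = mkMat arr.length (runLen arr) := by
  unfold LCP_all
  simp only [replicate_eq_mkMat]
  have h0 : mkMat arr.length (fun _ _ => (0:Int)) = mkMat arr.length (aPart arr arr.length) := by
    refine mkMat_congr (fun i j _ hj => ?_)
    unfold aPart
    by_cases h1 : arr.length ≤ i
    · rw [if_pos h1, runLen_zero (by rintro ⟨h1', h2', -⟩; omega)]
    · rw [if_neg h1]
  rw [h0, aOuter arr arr.length (le_refl _)]
  refine mkMat_congr (fun i j _ _ => ?_)
  unfold aPart
  rw [if_pos (Nat.zero_le i)]

-- ---------- port B equals mkMat runLen ----------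

-- diagonals with offset ≤ d already filled with runLen, the rest still zero
def bPart (arr : List Int) (d : Nat) : Nat → Nat → Int :=
  fun i j => if j ≤ i + d then runLen arr i j else 0

-- diagonal d partially filled: cells (i, i+d) done for i ≥ t
def bDiag (arr : List Int) (d t : Nat) : Nat → Nat → Int :=
  fun i j => if j = i + d ∧ t ≤ i then runLen arr i j else bPart arr (d-1) i j

lemma bInner (arr : List Int) (d : Nat) (hd : 1 ≤ d) (hdn : d ≤ arr.length) :
    ∀ k, k ≤ arr.length - d → ∀ c : Int, c = runLen arr k (k+d) →
    (List.range k).reverse.foldl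
      (fun (st : List (List Int) × Int) i =>
        let c := if arr.getD i 0 = arr.getD (i+d) 0 then st.2 + 1 else 0
        (pvSetMat st.1 i (i+d) c, c))
      (mkMat arr.length (bDiag arr d k), c)
      = (mkMat arr.length (bDiag arr d 0), runLen arr 0 d) := by
  intro k
  induction k with
  | zero => intro _ c hc; simp [hc]
  | succ k ih =>
    intro hk c hc
    rw [List.range_succ, List.reverse_append]
    simp only [List.reverse_cons, List.reverse_nil, List.nil_append, List.singleton_append,
      List.foldl_cons]
    have hkd : k + d < arr.length := by omega
    have hcv : (if arr.getD k 0 = arr.getD (k+d) 0 then c + 1 else 0)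
        = runLen arr k (k+d) := by
      by_cases he : arr.getD k 0 = arr.getD (k+d) 0
      · have hh : runLen arr k (k+d) = runLen arr (k+1) (k+d+1) + 1 := by
          rw [runLen, dif_pos ⟨by omega, hkd, he⟩]
        rw [if_pos he, hc, show k+1+(d) = k+d+1 from by omega] at *
        rw [hh]
      · rw [if_neg he, runLen_zero (by rintro ⟨-, -, h⟩; exact he h)]
    have hset : pvSetMat (mkMat arr.length (bDiag arr d (k+1))) k (k+d) (runLen arr k (k+d))
        = mkMat arr.length (bDiag arr d k) := by
      rw [pvSetMat_mkMat _ _ (by omega) (by omega)]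
      refine mkMat_congr (fun p q hp hq => ?_)
      unfold bDiag
      by_cases h1 : p = k ∧ q = k + d
      · rw [if_pos h1, if_pos (show q = p + d ∧ k ≤ p from ⟨by omega, by omega⟩), h1.1, h1.2]
      · rw [if_neg h1]
        by_cases h2 : q = p + d ∧ k+1 ≤ p
        · rw [if_pos h2, if_pos ⟨h2.1, by omega⟩]
        · have h3 : ¬ (q = p + d ∧ k ≤ p) := by
            rintro ⟨ha, hb⟩
            rcases Nat.lt_or_ge k p with h | h
            · exact h2 ⟨ha, by omega⟩
            · exact h1 ⟨by omega, by omega⟩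
          rw [if_neg h2, if_neg h3]
    rw [hcv, hset]
    exact ih (by omega) (runLen arr k (k+d)) rfl

lemma bDiag_start (arr : List Int) (d : Nat) (hd : 1 ≤ d) :
    mkMat arr.length (bPart arr (d-1)) = mkMat arr.length (bDiag arr d (arr.length - d)) := by
  refine mkMat_congr (fun i j _ _ => ?_)
  unfold bDiag
  by_cases h1 : j = i + d ∧ arr.length - d ≤ i
  · rw [if_pos h1, runLen_zero (by rintro ⟨-, h2', -⟩; omega)]
    unfold bPart
    rw [if_neg (by omega)]
  · rw [if_neg h1]

lemma bDiag_end (arr : List Int) (d : Nat) (hd : 1 ≤ d) :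
    mkMat arr.length (bDiag arr d 0) = mkMat arr.length (bPart arr d) := by
  refine mkMat_congr (fun i j _ _ => ?_)
  unfold bDiag bPart
  by_cases h1 : j = i + d
  · rw [if_pos ⟨h1, Nat.zero_le i⟩, if_pos (by omega)]
  · rw [if_neg (by simp [h1])]
    by_cases h2 : j ≤ i + (d-1)
    · rw [if_pos h2, if_pos (by omega)]
    · rw [if_neg h2, if_neg (by omega)]

lemma bOuter (arr : List Int) :
    ∀ m, m ≤ arr.length - 1 →
    (List.range' 1 m).foldl
      (fun lcp d =>
        ((List.range (arr.length - d)).reverse.foldl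
          (fun (st : List (List Int) × Int) i =>
            let c := if arr.getD i 0 = arr.getD (i+d) 0 then st.2 + 1 else 0
            (pvSetMat st.1 i (i+d) c, c))
          (lcp, 0)).1)
      (mkMat arr.length (bPart arr 0))
      = mkMat arr.length (bPart arr m) := by
  intro m
  induction m with
  | zero => intro _; simp
  | succ m ih =>
    intro hm
    rw [List.range'_concat, List.foldl_append, ih (by omega)]
    simp only [List.foldl_cons, List.foldl_nil, one_mul]
    set d := 1 + m with hd
    have hd1 : 1 ≤ d := by omega
    have hdn : d ≤ arr.length := by omega
    have hz : (0:Int) = runLen arr (arr.length - d) ((arr.length - d)+d) := by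
      rw [runLen_zero (by rintro ⟨-, h2', -⟩; omega)]
    have hstart : mkMat arr.length (bPart arr m) = mkMat arr.length (bDiag arr d (arr.length - d)) := by
      rw [show m = d - 1 from by omega]
      exact bDiag_start arr d hd1
    rw [hstart, bInner arr d hd1 hdn (arr.length - d) (le_refl _) 0 hz]
    rw [show (mkMat arr.length (bDiag arr d 0), runLen arr 0 d).1
        = mkMat arr.length (bDiag arr d 0) from rfl]
    rw [bDiag_end arr d hd1, show d = m + 1 from by omega]

lemma LCP_all_alt_eq (arr : List Int) :
    LCP_all_alt arr = mkMat arr.length (runLen arr) := by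
  unfold LCP_all_alt
  simp only [replicate_eq_mkMat]
  have h0 : mkMat arr.length (fun _ _ => (0:Int)) = mkMat arr.length (bPart arr 0) := by
    refine mkMat_congr (fun i j _ _ => ?_)
    unfold bPart
    by_cases h1 : j ≤ i + 0
    · rw [if_pos h1, runLen_zero (by rintro ⟨h1', h2', -⟩; omega)]
    · rw [if_neg h1]
  rw [h0, bOuter arr (arr.length - 1) (le_refl _)]
  refine mkMat_congr (fun i j _ hj => ?_)
  unfold bPart
  by_cases h1 : j ≤ i + (arr.length - 1)
  · rw [if_pos h1]
  · rw [if_neg h1, runLen_zero (by rintro ⟨h1', h2', -⟩; omega)]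

-- ===== VERDICT (by name: the statement is the Claim_ definition above) =====
theorem LCP_all_spec : Claim_equal_LCP_all := by
  intro arr _
  unfold Spec_LCP_all
  rw [LCP_all_eq, LCP_all_alt_eq]
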